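-- pv_equiv track=rewrite | github.com/yoonho0922/Algorithm | python/daliy-solve/2024-08/week01/키로거.py | get_pw
-- ===== SOURCE A (Python) =====
-- def get_pw(logs):
--     fs, bs = [], []
--
--     for key in logs:
--         if key == '-':
--             if fs:
--                 fs.pop()
--         elif key == '<':
--             if fs:
--                 bs.append(fs.pop())
--         elif key == '>':
--             if bs:
--                 fs.append(bs.pop())
--         else:
--             fs.append(key)
--
--     return fs + bs[::-1]
-- ===== SOURCE B (Python) =====
-- def get_pw(logs):
--     result = []
--     cursor = 0
--     for key in logs:
--         if key == '-':
--             if cursor > 0: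
--                 del result[cursor-1]
--                 cursor -= 1
--         elif key == '<':
--             if cursor > 0:
--                 cursor -= 1
--         elif key == '>':
--             if cursor < len(result):
--                 cursor += 1
--         else:
--             result.insert(cursor, key)
--             cursor += 1
--     return result
-- ===== Notes on version B (the rewrite author's own statement) =====
-- stated objective: simpler
-- what changed: Replaces the two-stack (left/right of cursor) representation with a single list plus an integer cursor index, deleting/inserting in place at the cursor.
import Mathlib
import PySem

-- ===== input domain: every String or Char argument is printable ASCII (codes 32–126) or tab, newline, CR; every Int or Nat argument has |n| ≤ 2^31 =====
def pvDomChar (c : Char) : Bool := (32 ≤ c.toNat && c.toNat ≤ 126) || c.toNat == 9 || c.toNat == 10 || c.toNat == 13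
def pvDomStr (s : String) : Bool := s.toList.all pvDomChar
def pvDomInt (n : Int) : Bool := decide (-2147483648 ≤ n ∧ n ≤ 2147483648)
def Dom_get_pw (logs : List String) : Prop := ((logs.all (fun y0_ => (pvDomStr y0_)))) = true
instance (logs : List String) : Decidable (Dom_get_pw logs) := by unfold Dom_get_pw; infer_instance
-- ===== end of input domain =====

-- B keeps one list plus an integer cursor instead of A's two stacks (simpler data structure, same result).

-- ===== PORT A =====
-- one key of A's loop over the pair of stacks (fs, bs)
def pvStepA (p : List String × List String) (key : String) : List String × List String :=
  let fs := p.1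
  let bs := p.2
  if key == "-" then
    if fs.isEmpty then (fs, bs) else (fs.dropLast, bs)
  else if key == "<" then
    if fs.isEmpty then (fs, bs) else (fs.dropLast, bs ++ [fs.getLastD ""])
  else if key == ">" then
    if bs.isEmpty then (fs, bs) else (fs ++ [bs.getLastD ""], bs.dropLast)
  else (fs ++ [key], bs)

def get_pw (logs : List String) : List String :=
  let st := logs.foldl pvStepA ([], [])
  st.1 ++ st.2.reverse   -- fs + bs[::-1]

-- ===== PORT B =====
-- one key of B's loop over (result, cursor); del result[cursor-1] / result.insert(cursor, key)
def pvStepB (p : List String × Int) (key : String) : List String × Int :=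
  let result := p.1
  let cursor := p.2
  if key == "-" then
    if cursor > 0 then
      -- del result[cursor-1]; the guard keeps the index in range, so pop? is some
      (match PySem.List.pop? result (cursor - 1) with
       | some r => r.2
       | none => result,
       cursor - 1)
    else (result, cursor)
  else if key == "<" then
    if cursor > 0 then (result, cursor - 1) else (result, cursor)
  else if key == ">" then
    if cursor < (result.length : Int) then (result, cursor + 1) else (result, cursor)
  else
    (PySem.List.insert result cursor key, cursor + 1)

def get_pw_alt (logs : List String) : List String :=
  (logs.foldl pvStepB ([], 0)).1

-- ===== PRECONDITION & SPEC =====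
def Spec_get_pw (logs : List String) (out : List String) : Prop := out = get_pw_alt logs
instance (logs : List String) (out : List String) : Decidable (Spec_get_pw logs out) := by unfold Spec_get_pw; infer_instance

-- ===== CLAIM (what is proved, stated in full; the proofs are below) =====
def Claim_equal_get_pw : Prop := ∀ (logs : List String), Dom_get_pw logs → Spec_get_pw logs (get_pw logs)

-- ===== LEMMAS AND PROOFS =====

-- the simulation relation: B's state is A's text with the cursor at fs.length
theorem pvStep_rel (fs bs : List String) (key : String) :
    pvStepB (fs ++ bs.reverse, (fs.length : Int)) key
      = ((pvStepA (fs, bs) key).1 ++ (pvStepA (fs, bs) key).2.reverse,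
         ((pvStepA (fs, bs) key).1.length : Int)) := by
  unfold pvStepA pvStepB
  by_cases h1 : key == "-"
  · simp only [h1, if_true]
    rcases fs.eq_nil_or_concat with rfl | ⟨l, a, rfl⟩
    · simp
    · simp only [List.concat_eq_append]
      have hc : (0 : Int) < (((l ++ [a]).length : Int)) := by simp
      have hm : (((l ++ [a]).length : Int)) - 1 = (l.length : Int) := by simp
      rw [if_pos (by exact_mod_cast hc)]
      rw [hm, List.append_assoc,
          PySem.List.pop?_natCast (l ++ ([a] ++ bs.reverse)) l.length (by simp)]
      simp [List.eraseIdx_append_of_length_le (Nat.le_refl l.length)]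
  · simp only [h1, if_false, Bool.false_eq_true]
    by_cases h2 : key == "<"
    · simp only [h2, if_true]
      rcases fs.eq_nil_or_concat with rfl | ⟨l, a, rfl⟩
      · simp
      · simp only [List.concat_eq_append]
        have hc : (0 : Int) < (((l ++ [a]).length : Int)) := by simp
        rw [if_pos (by exact_mod_cast hc)]
        simp
    · simp only [h2, if_false, Bool.false_eq_true]
      by_cases h3 : key == ">"
      · simp only [h3, if_true]
        rcases bs.eq_nil_or_concat with rfl | ⟨m, b, rfl⟩
        · simp
        · simp only [List.concat_eq_append]
          have hc : (fs.length : Int) < ((fs ++ (m ++ [b]).reverse).length : Int) := by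
            simp
          rw [if_pos (by exact_mod_cast hc)]
          simp
      · simp only [h3, if_false, Bool.false_eq_true]
        rw [PySem.List.insert_natCast (fs ++ bs.reverse) fs.length key (by simp)]
        simp

theorem pvFold_rel (logs : List String) : ∀ (fs bs : List String),
    logs.foldl pvStepB (fs ++ bs.reverse, (fs.length : Int))
      = ((logs.foldl pvStepA (fs, bs)).1 ++ (logs.foldl pvStepA (fs, bs)).2.reverse,
         ((logs.foldl pvStepA (fs, bs)).1.length : Int)) := by
  induction logs with
  | nil => intro fs bs; simp
  | cons key rest ih =>
    intro fs bs
    have h := pvStep_rel fs bs key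
    simp only [List.foldl_cons, h]
    exact ih (pvStepA (fs, bs) key).1 (pvStepA (fs, bs) key).2

-- ===== VERDICT (by name: the statement is the Claim_ definition above) =====
theorem get_pw_spec : Claim_equal_get_pw := by
  intro logs _
  unfold Spec_get_pw get_pw get_pw_alt
  have h := pvFold_rel logs [] []
  simp at h
  simp [h]
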